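-- pv_equiv track=rewrite | github.com/Fehmeeda/piRNA_scripts | Scripts/histogram_pdf_overlapping_curves.py | extract_valid_kmers
-- ===== SOURCE A (Python) =====
-- def extract_valid_kmers(seq, k=3):
--     valid = {"A", "C", "G", "T"}
--     kmers = []
--     for i in range(len(seq) - k + 1):
--         kmer = seq[i:i+k]
--         if all(c in valid for c in kmer):
--             kmers.append(kmer)
--     return kmers
-- ===== SOURCE B (Python) =====
-- def extract_valid_kmers(seq, k=3):
--     # One left-to-right pass keeping the length of the current run of
--     # consecutive ACGT characters; a window ending at i is fully valid
--     # exactly when the run reaches k, so no per-window validity scan is needed.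
--     if k <= 0:
--         return []
--     kmers = []
--     run = 0
--     for i, c in enumerate(seq):
--         run = run + 1 if c in "ACGT" else 0
--         if run >= k:
--             kmers.append(seq[i - k + 1 : i + 1])
--     return kmers
-- ===== Notes on version B (the rewrite author's own statement) =====
-- stated objective: faster
-- what changed: Replaces the per-window scan that re-checks every character of each length-k slice by a single left-to-right pass that maintains the length of the current run of consecutive valid nucleotide characters and emits the window ending at position i exactly when the run reaches k (no per-window generator/set-membership rescan).
-- intended difference: For k <= 0, A returns len(seq)-k+1 degenerate windows produced by its range and slice arithmetic (empty strings and, for negative k, wrapped-around slices that may be non-empty); B returns the empty list, the intended answer when the requested window length is non-positive. — e.g. on extract_valid_kmers("A", 0): A returns ["", ""], B returns []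
import Mathlib
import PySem

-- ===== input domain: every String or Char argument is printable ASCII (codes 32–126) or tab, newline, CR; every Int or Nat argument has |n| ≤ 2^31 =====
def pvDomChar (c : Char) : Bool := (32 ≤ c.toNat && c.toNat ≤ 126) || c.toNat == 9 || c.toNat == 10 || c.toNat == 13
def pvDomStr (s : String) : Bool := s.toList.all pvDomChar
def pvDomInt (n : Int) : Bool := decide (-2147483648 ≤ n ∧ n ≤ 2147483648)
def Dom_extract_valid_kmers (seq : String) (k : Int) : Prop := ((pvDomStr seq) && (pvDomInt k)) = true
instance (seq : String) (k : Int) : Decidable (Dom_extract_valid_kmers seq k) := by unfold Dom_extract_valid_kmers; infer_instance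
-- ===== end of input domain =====

-- B replaces A's per-window validity scan by a single pass with a run-length counter
-- (reported measurably faster in a timing run);
-- for k ≤ 0, where A's range/slice arithmetic emits degenerate windows, B returns []
-- (stated as the intended difference D_ below).

-- ===== PORT A =====
-- Literal port of A: for each start i in range(len(seq)-k+1), slice seq[i:i+k]
-- and append it when all its characters are in the set {'A','C','G','T'}.
def extract_valid_kmers (seq : String) (k : Int) : List String :=
  let valid : PySem.Set Char := PySem.Set.ofList ['A', 'C', 'G', 'T']
  (PySem.List.pyRange 0 (PySem.Str.len seq - k + 1) 1).foldl
    (fun kmers i =>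
      let kmer := PySem.Str.slice seq (some i) (some (i + k))
      if kmer.toList.all (fun c => PySem.Set.contains valid c) then kmers ++ [kmer]
      else kmers) []

-- ===== PORT B =====
-- Literal port of Source B: one pass over enumerate(seq) keeping the run length of
-- consecutive valid characters; 'c in "ACGT"' for the single character c is
-- exactly membership of c among the string's characters.
def extract_valid_kmers_alt (seq : String) (k : Int) : List String :=
  if k ≤ 0 then []
  else
    ((PySem.List.enumerate seq.toList 0).foldl
      (fun (st : List String × Int) p =>
        let run : Int := if "ACGT".toList.contains p.2 then st.2 + 1 else 0
        let kmers := if k ≤ run then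
            st.1 ++ [PySem.Str.slice seq (some (p.1 - k + 1)) (some (p.1 + 1))]
          else st.1
        (kmers, run)) ([], 0)).1

-- ===== PRECONDITION & SPEC =====
-- For k ≤ 0, A returns len(seq)-k+1 degenerate windows produced by its range and slice
-- arithmetic (empty strings and, for negative k, wrapped-around slices that may be
-- non-empty); B returns the empty list, the intended answer when the requested window
-- length is non-positive.
def D_extract_valid_kmers (seq : String) (k : Int) : Prop := k ≤ 0
instance (seq : String) (k : Int) : Decidable (D_extract_valid_kmers seq k) := by
  unfold D_extract_valid_kmers; infer_instance

def Spec_extract_valid_kmers (seq : String) (k : Int) (out : List String) : Prop :=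
  ¬ D_extract_valid_kmers seq k → out = extract_valid_kmers_alt seq k
instance (seq : String) (k : Int) (out : List String) : Decidable (Spec_extract_valid_kmers seq k out) := by
  unfold Spec_extract_valid_kmers; infer_instance

def pvDiffWitness_extract_valid_kmers : String × Int := ("A", 0)
def pvDiffWitnessOut_extract_valid_kmers : (List String) × (List String) := (["", ""], [])

-- ===== CLAIM (what is proved, stated in full; the proofs are below) =====
def Claim_unchanged_extract_valid_kmers : Prop := ∀ (seq : String) (k : Int), Dom_extract_valid_kmers seq k → Spec_extract_valid_kmers seq k (extract_valid_kmers seq k)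
def Claim_changed_extract_valid_kmers : Prop := Dom_extract_valid_kmers (pvDiffWitness_extract_valid_kmers.1) (pvDiffWitness_extract_valid_kmers.2) ∧ D_extract_valid_kmers (pvDiffWitness_extract_valid_kmers.1) (pvDiffWitness_extract_valid_kmers.2) ∧ extract_valid_kmers (pvDiffWitness_extract_valid_kmers.1) (pvDiffWitness_extract_valid_kmers.2) = pvDiffWitnessOut_extract_valid_kmers.1 ∧ extract_valid_kmers_alt (pvDiffWitness_extract_valid_kmers.1) (pvDiffWitness_extract_valid_kmers.2) = pvDiffWitnessOut_extract_valid_kmers.2 ∧ pvDiffWitnessOut_extract_valid_kmers.1 ≠ pvDiffWitnessOut_extract_valid_kmers.2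
def Claim_exact_extract_valid_kmers : Prop := ∀ (seq : String) (k : Int), Dom_extract_valid_kmers seq k → D_extract_valid_kmers seq k → extract_valid_kmers seq k ≠ extract_valid_kmers_alt seq k

-- ===== LEMMAS AND PROOFS =====

-- the validity predicate both programs test, on the character level
def kValid (c : Char) : Bool := ['A', 'C', 'G', 'T'].contains c

-- B's run counter, as a function of the processed prefix
def runLen (l : List Char) : Nat := l.foldl (fun r c => if kValid c then r + 1 else 0) 0

lemma setValid_eq (c : Char) :
    PySem.Set.contains (PySem.Set.ofList ['A', 'C', 'G', 'T']) c = kValid c := rfl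

lemma acgt_toList : "ACGT".toList = ['A', 'C', 'G', 'T'] := by decide

lemma runLen_append_singleton (l : List Char) (c : Char) :
    runLen (l ++ [c]) = if kValid c then runLen l + 1 else 0 := by
  simp [runLen, List.foldl_append]

-- an A-side window whose start lies at or beyond the end of the list is empty
lemma slice_nil_of_ge (l : List Char) (i b : Int) (h1 : (l.length : Int) ≤ i) (h0 : 0 ≤ i) :
    PySem.List.slice l (some i) (some b) = [] := by
  have ha : PySem.List.clampIdx l.length i = l.length := by
    simp only [PySem.List.clampIdx]
    rw [if_neg (by omega)]
    omega
  simp only [PySem.List.slice, ha, List.drop_length, List.take_nil]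

lemma runLen_ge_iff : ∀ (l : List Char) (K : Nat), 1 ≤ K →
    (K ≤ runLen l ↔ K ≤ l.length ∧ (l.drop (l.length - K)).all kValid) := by
  intro l
  induction l using List.reverseRecOn with
  | nil => intro K hK; simp [runLen]
  | append_singleton l c ih =>
    intro K hK
    rw [runLen_append_singleton]
    by_cases hc : kValid c
    · simp only [hc, if_pos]
      rcases Nat.lt_or_ge 1 K with h2 | h1
      · -- 2 ≤ K
        have ih' := ih (K - 1) (by omega)
        have hdrop : (l ++ [c]).drop ((l ++ [c]).length - K) =
            l.drop (l.length - (K - 1)) ++ [c] := by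
          rw [List.length_append, List.length_singleton,
            show l.length + 1 - K = l.length - (K - 1) from by omega,
            List.drop_append_of_le_length (by omega)]
        constructor
        · intro h
          have h' : K - 1 ≤ runLen l := by omega
          obtain ⟨ha, hb⟩ := ih'.mp h'
          refine ⟨by simp; omega, ?_⟩
          rw [hdrop]
          simp [hb, hc]
        · rintro ⟨ha, hb⟩
          rw [hdrop] at hb
          simp [hc] at hb
          have := ih'.mpr ⟨by simp at ha; omega, by simpa using hb⟩
          omega
      · -- K = 1
        have hK1 : K = 1 := by omega
        subst hK1
        simp only [List.length_append, List.length_singleton]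
        rw [show l.length + 1 - 1 = l.length by omega]
        rw [List.drop_left]
        simp [hc]
    · simp only [hc, if_neg, Bool.false_eq_true, not_false_iff]
      constructor
      · intro h; omega
      · rintro ⟨ha, hb⟩
        exfalso
        have hle : (l ++ [c]).length - K ≤ l.length := by simp; omega
        have : c ∈ (l ++ [c]).drop ((l ++ [c]).length - K) := by
          rw [List.drop_append_of_le_length hle]
          simp
        have := List.all_eq_true.mp hb c this
        simp [hc] at this

lemma runLen_le (l : List Char) : runLen l ≤ l.length := by
  rcases Nat.eq_zero_or_pos (runLen l) with h | h
  · omega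
  · exact ((runLen_ge_iff l (runLen l) h).mp le_rfl).1

-- B's fold, evaluated against the filtered-window form
lemma bfold (seq : String) (k : Int) :
    ∀ (l₂ l₁ : List Char) (acc : List String),
      (PySem.List.enumerate l₂ (l₁.length : Int)).foldl
        (fun (st : List String × Int) p =>
          let run : Int := if "ACGT".toList.contains p.2 then st.2 + 1 else 0
          let kmers := if k ≤ run then
              st.1 ++ [PySem.Str.slice seq (some (p.1 - k + 1)) (some (p.1 + 1))]
            else st.1
          (kmers, run)) (acc, (runLen l₁ : Int))
      = (acc ++ ((List.range' l₁.length l₂.length).filter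
            (fun e => decide (k ≤ (runLen ((l₁ ++ l₂).take (e + 1)) : Int)))).map
            (fun e : Nat => PySem.Str.slice seq (some ((e : Int) - k + 1)) (some ((e : Int) + 1))),
         ((runLen (l₁ ++ l₂) : Nat) : Int)) := by
  intro l₂
  induction l₂ with
  | nil => intro l₁ acc; simp [PySem.List.enumerate_nil]
  | cons c l₂ ih =>
    intro l₁ acc
    rw [PySem.List.enumerate_cons]
    rw [List.foldl_cons]
    -- the new run value
    have hrun : (if "ACGT".toList.contains c then ((runLen l₁ : Nat) : Int) + 1 else 0)
        = ((runLen (l₁ ++ [c]) : Nat) : Int) := by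
      rw [acgt_toList, runLen_append_singleton]
      show (if kValid c then ((runLen l₁ : Nat) : Int) + 1 else 0) = _
      split_ifs <;> push_cast <;> ring
    have htake : (l₁ ++ c :: l₂).take (l₁.length + 1) = l₁ ++ [c] := by
      have : l₁ ++ c :: l₂ = (l₁ ++ [c]) ++ l₂ := by simp
      rw [this, show l₁.length + 1 = (l₁ ++ [c]).length by simp, List.take_left]
    have hlen : ((l₁.length : Int) + 1) = (((l₁ ++ [c]).length : Nat) : Int) := by
      simp
    simp only [hrun]
    rw [hlen]
    rw [ih (l₁ ++ [c])]
    have hassoc : l₁ ++ c :: l₂ = (l₁ ++ [c]) ++ l₂ := by simp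
    simp only [List.length_cons]
    rw [List.range'_succ, List.filter_cons]
    simp only [htake]
    rw [hassoc]
    by_cases hcond : k ≤ ((runLen (l₁ ++ [c]) : Nat) : Int)
    · simp only [hcond, decide_true, if_true, List.map_cons, List.append_assoc,
        List.singleton_append, List.length_append, List.length_singleton]
      rfl

    · simp only [hcond, decide_false, if_false, Bool.false_eq_true, List.length_append, List.length_singleton]

lemma a_norm (seq : String) (k : Int) (hk : 1 ≤ k) :
    extract_valid_kmers seq k =
      ((List.range (seq.toList.length + 1 - k.toNat)).filter
        (fun j => ((seq.toList.drop j).take k.toNat).all kValid)).map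
        (fun j : Nat => PySem.Str.slice seq (some (j : Int)) (some ((j : Int) + k))) := by
  have hk' : k = (k.toNat : Int) := by omega
  have hp : ∀ t : Nat,
      ((PySem.Str.slice seq (some (t : Int)) (some ((t : Int) + k))).toList.all
        (fun c => PySem.Set.contains (PySem.Set.ofList ['A', 'C', 'G', 'T']) c))
      = ((seq.toList.drop t).take k.toNat).all kValid := by
    intro t
    conv_lhs => rw [hk']
    rw [show PySem.Str.slice seq (some (t : Int)) (some ((t : Int) + (k.toNat : Int)))
        = String.ofList (PySem.List.slice seq.toList (some (t : Int))
            (some ((t : Int) + (k.toNat : Int)))) from rfl]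
    rw [String.toList_ofList, PySem.List.slice_natCast_add]
    simp only [setValid_eq]
  have hM : (PySem.Str.len seq - k + 1 - 0).toNat = seq.toList.length + 1 - k.toNat := by
    simp only [PySem.Str.len]; omega
  simp only [extract_valid_kmers]
  rw [PySem.List.pyRange_one, List.foldl_map]
  rw [PySem.List.foldl_append_if]
  simp only [zero_add, List.nil_append, hM, hp]

theorem unchanged_core (seq : String) (k : Int) (hk : 1 ≤ k) :
    extract_valid_kmers seq k = extract_valid_kmers_alt seq k := by
  have hk' : k = (k.toNat : Int) := by omega
  set cs := seq.toList with hcs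
  set n := cs.length with hn
  set K := k.toNat with hK
  have hK1 : 1 ≤ K := by omega
  have hB : extract_valid_kmers_alt seq k =
      ((List.range' 0 n).filter
        (fun e => decide (k ≤ (runLen (cs.take (e + 1)) : Int)))).map
        (fun e : Nat => PySem.Str.slice seq (some ((e : Int) - k + 1)) (some ((e : Int) + 1))) := by
    have h := bfold seq k cs [] []
    simp only [List.length_nil, Nat.cast_zero, List.nil_append, runLen, List.foldl_nil] at h
    rw [extract_valid_kmers_alt, if_neg (by omega), ← hcs]
    exact congrArg Prod.fst h
  rw [hB, a_norm seq k hk, ← hcs, ← hn, ← hK]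
  symm
  by_cases hKn : K ≤ n
  · have hsplit : List.range' 0 n = List.range' 0 (K - 1) ++ List.range' (K - 1) (n + 1 - K) := by
      have := List.range'_append (s := 0) (m := K - 1) (n := n + 1 - K) (step := 1)
      simp only [Nat.one_mul, Nat.zero_add] at this
      rw [this, show K - 1 + (n + 1 - K) = n from by omega]
    rw [hsplit, List.filter_append]
    have h1 : (List.range' 0 (K - 1)).filter
        (fun e => decide (k ≤ (runLen (cs.take (e + 1)) : Int))) = [] := by
      rw [List.filter_eq_nil_iff]
      intro e he
      rw [List.mem_range'] at he
      obtain ⟨i, hi, rfl⟩ := he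
      simp only [decide_eq_true_eq, not_le]
      have h2 := runLen_le (cs.take (0 + 1 * i + 1))
      have h3 : (cs.take (0 + 1 * i + 1)).length ≤ i + 1 := by
        rw [List.length_take]; omega
      omega
    rw [h1, List.nil_append]
    rw [List.range'_eq_map_range, List.filter_map, List.map_map]
    simp only [Function.comp_def]
    have hfc : ∀ j ∈ List.range (n + 1 - K),
        (decide (k ≤ (runLen (cs.take (K - 1 + j + 1)) : Int)))
        = ((cs.drop j).take K).all kValid := by
      intro j hj
      rw [List.mem_range] at hj
      have hlen_take : (cs.take (K - 1 + j + 1)).length = K + j := by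
        rw [List.length_take]; omega
      have hiff : (k ≤ (runLen (cs.take (K - 1 + j + 1)) : Int)) ↔
          (((cs.drop j).take K).all kValid = true) := by
        rw [show (k ≤ (runLen (cs.take (K - 1 + j + 1)) : Int)) ↔
            (K ≤ runLen (cs.take (K - 1 + j + 1))) from by omega]
        rw [runLen_ge_iff _ K hK1, hlen_take]
        rw [show K + j - K = j from by omega, List.drop_take,
          show K - 1 + j + 1 - j = K from by omega]
        constructor
        · rintro ⟨-, h⟩; exact h
        · intro h; exact ⟨by omega, h⟩
      cases hq : ((cs.drop j).take K).all kValid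
      · simp [hiff, hq]
      · simp [hiff, hq]
    rw [List.filter_congr hfc]
    apply List.map_congr_left
    intro j hj
    have hj' : j < n + 1 - K := by
      have := (List.mem_filter.mp hj).1
      rwa [List.mem_range] at this
    have e1 : ((K - 1 + j : Nat) : Int) - k + 1 = (j : Int) := by omega
    have e2 : ((K - 1 + j : Nat) : Int) + 1 = (j : Int) + k := by omega
    rw [e1, e2]
  · have h1 : (List.range' 0 n).filter
        (fun e => decide (k ≤ (runLen (cs.take (e + 1)) : Int))) = [] := by
      rw [List.filter_eq_nil_iff]
      intro e he
      rw [List.mem_range'] at he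
      obtain ⟨i, hi, rfl⟩ := he
      simp only [decide_eq_true_eq, not_le]
      have h2 := runLen_le (cs.take (0 + 1 * i + 1))
      have h3 : (cs.take (0 + 1 * i + 1)).length ≤ n := by
        rw [List.length_take]; omega
      omega
    rw [h1, show n + 1 - K = 0 from by omega]
    simp

-- ===== VERDICT (by name: the statement is the Claim_ definition above) =====
theorem extract_valid_kmers_spec : Claim_unchanged_extract_valid_kmers := by
  intro seq k _ hD
  have hk : 1 ≤ k := by
    simp only [D_extract_valid_kmers] at hD; omega
  exact unchanged_core seq k hk

theorem extract_valid_kmers_changed : Claim_changed_extract_valid_kmers := by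
  unfold Claim_changed_extract_valid_kmers; decide

theorem extract_valid_kmers_tight : Claim_exact_extract_valid_kmers := by
  intro seq k _ hD
  simp only [D_extract_valid_kmers] at hD
  have hBnil : extract_valid_kmers_alt seq k = [] := by
    rw [extract_valid_kmers_alt, if_pos hD]
  rw [hBnil]
  have hlen : PySem.Str.len seq = (seq.toList.length : Int) := rfl
  simp only [extract_valid_kmers]
  rw [PySem.List.pyRange_one, List.foldl_map, PySem.List.foldl_append_if]
  simp only [List.nil_append, ne_eq]
  intro hcontra
  rw [List.map_eq_nil_iff, List.filter_eq_nil_iff] at hcontra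
  set m := (PySem.Str.len seq - k + 1 - 0).toNat with hm
  have hmge : seq.toList.length + 1 ≤ m := by rw [hm, hlen]; omega
  refine hcontra (m - 1) (by rw [List.mem_range]; omega) ?_
  have hsl : PySem.Str.slice seq (some ((0 : Int) + ((m - 1 : Nat) : Int)))
      (some ((0 : Int) + ((m - 1 : Nat) : Int) + k)) = String.ofList [] := by
    show String.ofList (PySem.List.slice seq.toList _ _) = String.ofList []
    rw [slice_nil_of_ge seq.toList _ _ (by omega) (by exact Int.natCast_nonneg _)]
  rw [hsl, String.toList_ofList]
  simp
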